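-- pv_equiv track=rewrite | github.com/andy-ang/Glider_attempts | YouAreInTheArmyNow.py | solve
-- ===== SOURCE A (Python) =====
-- def checkSolution(ltemp_list):
--     answer = 0
--     for i in range(len(ltemp_list)-1):
--         if ((i+1) % 2 != 0) and ltemp_list[i] < ltemp_list[i+1]: #odd
--             answer = 1
--         elif ((i+1) % 2 == 0) and ltemp_list[i] > ltemp_list[i+1]: #even
--             answer = 1
--         else:
--             answer = 0
--             break
--     return answer
--
-- def solve(arr):
--     # Write your code here
--     final_list = []
--     if len(arr) == 2 and arr[0] != arr[1]:
--         final_list.append(sorted(arr))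
--     else:
--         for i in range(len(arr)):
--             for j in range(len(arr)):
--                 if i != j and i > j:
--                     temp_arr = list(arr)
--                     temp_arr[i], temp_arr[j] = temp_arr[j], temp_arr[i]
--                     if checkSolution(temp_arr) == 1 and (temp_arr not in final_list):
--                        final_list.append(temp_arr)
--
--     return final_list
-- ===== SOURCE B (Python) =====
-- def _ok(x, y, k):
--     # adjacency k (0-based) of a zigzag must rise on even k and fall on odd k
--     return x < y if k % 2 == 0 else x > y
--
-- def solve(arr):
--     # Write your code here
--     n = len(arr)
--     final_list = []
--     if n == 2 and arr[0] != arr[1]: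
--         final_list.append(sorted(arr))
--         return final_list
--     bad = [k for k in range(n - 1) if not _ok(arr[k], arr[k + 1], k)]
--     total_bad = len(bad)
--     badset = set(bad)
--     seen = set()
--     for i in range(n):
--         for j in range(i):
--             affected = []
--             for k in (j - 1, j, i - 1, i):
--                 if 0 <= k < n - 1 and k not in affected:
--                     affected.append(k)
--             if total_bad != sum(1 for k in affected if k in badset):
--                 continue
--             def val(k):
--                 if k == i:
--                     return arr[j]
--                 if k == j:
--                     return arr[i]
--                 return arr[k]
--             if all(_ok(val(k), val(k + 1), k) for k in affected):
--                 temp = list(arr)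
--                 temp[i], temp[j] = temp[j], temp[i]
--                 t = tuple(temp)
--                 if t not in seen:
--                     seen.add(t)
--                     final_list.append(temp)
--     return final_list
-- ===== Notes on version B (the rewrite author's own statement) =====
-- stated objective: faster
-- what changed: Instead of rebuilding each swapped copy and re-scanning the whole array for the zigzag property plus an O(m) list-membership dedup, B precomputes the set of bad adjacencies of the original array once and decides each swap by an O(1) recheck of only the <=4 adjacencies the swap touches (all other adjacencies must already be good), with set-based dedup of results.
import Mathlib
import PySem

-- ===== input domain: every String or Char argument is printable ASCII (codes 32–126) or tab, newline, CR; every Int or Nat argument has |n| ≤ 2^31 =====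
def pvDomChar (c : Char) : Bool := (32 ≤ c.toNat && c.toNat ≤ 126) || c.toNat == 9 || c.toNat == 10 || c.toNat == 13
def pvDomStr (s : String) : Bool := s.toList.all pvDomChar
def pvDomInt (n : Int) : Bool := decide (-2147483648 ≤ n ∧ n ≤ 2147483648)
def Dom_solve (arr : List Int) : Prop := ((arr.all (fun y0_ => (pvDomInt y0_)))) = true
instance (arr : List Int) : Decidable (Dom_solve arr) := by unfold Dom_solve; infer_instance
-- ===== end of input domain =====

-- B replaces A's O(n) zigzag re-check of every swapped copy (plus an O(m) list-membership dedup)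
-- by an O(1) incremental recheck of only the ≤4 adjacencies a swap touches, with set-based dedup.

-- ===== PORT A =====
-- checkSolution's loop (break returns 0)
def checkGo (l : List Int) : List Int → Int → Int
  | [], answer => answer
  | i :: rest, _ =>
    if PySem.Int.mod (i + 1) 2 ≠ 0 ∧ PySem.List.pyGetD l i 0 < PySem.List.pyGetD l (i + 1) 0 then
      checkGo l rest 1
    else if PySem.Int.mod (i + 1) 2 = 0 ∧ PySem.List.pyGetD l i 0 > PySem.List.pyGetD l (i + 1) 0 then
      checkGo l rest 1
    else 0

def checkSolution (l : List Int) : Int :=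
  checkGo l (PySem.List.pyRange 0 ((l.length : Int) - 1) 1) 0

def solve (arr : List Int) : List (List Int) :=
  if arr.length = 2 ∧ PySem.List.pyGetD arr 0 0 ≠ PySem.List.pyGetD arr 1 0 then
    [PySem.List.sorted arr (fun x => x) false]
  else
    (PySem.List.pyRange 0 (arr.length : Int) 1).foldl (fun fl i =>
      (PySem.List.pyRange 0 (arr.length : Int) 1).foldl (fun fl j =>
        if i ≠ j ∧ i > j then
          let temp := PySem.List.pySetD (PySem.List.pySetD arr i (PySem.List.pyGetD arr j 0)) j
            (PySem.List.pyGetD arr i 0)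
          if checkSolution temp = 1 ∧ temp ∉ fl then fl ++ [temp] else fl
        else fl) fl) []

-- ===== PORT B =====
def altOk (x y : Int) (k : Int) : Bool :=
  if PySem.Int.mod k 2 = 0 then decide (x < y) else decide (x > y)

def solve_alt (arr : List Int) : List (List Int) :=
  let n : Int := arr.length
  if arr.length = 2 ∧ PySem.List.pyGetD arr 0 0 ≠ PySem.List.pyGetD arr 1 0 then
    [PySem.List.sorted arr (fun x => x) false]
  else
    let bad := (PySem.List.pyRange 0 (n - 1) 1).filter
      (fun k => !altOk (PySem.List.pyGetD arr k 0) (PySem.List.pyGetD arr (k + 1) 0) k)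
    let totalBad : Int := bad.length
    let badset : PySem.Set Int := PySem.Set.ofList bad
    ((PySem.List.pyRange 0 n 1).foldl (fun st i =>
      (PySem.List.pyRange 0 i 1).foldl (fun (st : List (List Int) × PySem.Set (List Int)) j =>
        let affected := [j - 1, j, i - 1, i].foldl
          (fun acc k => if (0 ≤ k ∧ k < n - 1) ∧ k ∉ acc then acc ++ [k] else acc) []
        if totalBad ≠ ((affected.filter (fun k => PySem.Set.contains badset k)).length : Int) then st
        else
          let val := fun k =>
            if k = i then PySem.List.pyGetD arr j 0
            else if k = j then PySem.List.pyGetD arr i 0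
            else PySem.List.pyGetD arr k 0
          if affected.all (fun k => altOk (val k) (val (k + 1)) k) then
            let temp := PySem.List.pySetD (PySem.List.pySetD arr i (PySem.List.pyGetD arr j 0)) j
              (PySem.List.pyGetD arr i 0)
            if temp ∈ st.2 then st else (st.1 ++ [temp], PySem.Set.add st.2 temp)
          else st) st) (([] : List (List Int)), (PySem.Set.empty : PySem.Set (List Int)))).1

-- ===== PRECONDITION & SPEC =====
def Spec_solve (arr : List Int) (out : List (List Int)) : Prop := out = solve_alt arr
instance (arr : List Int) (out : List (List Int)) : Decidable (Spec_solve arr out) := by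
  unfold Spec_solve; infer_instance

-- ===== CLAIM (what is proved, stated in full; the proofs are below) =====
def Claim_equal_solve : Prop := ∀ (arr : List Int), Dom_solve arr → Spec_solve arr (solve arr)

-- ===== LEMMAS AND PROOFS =====

-- proof-side names for subterms of the two ports (definitionally equal to them)
def tempL (arr : List Int) (i j : Int) : List Int :=
  PySem.List.pySetD (PySem.List.pySetD arr i (PySem.List.pyGetD arr j 0)) j
    (PySem.List.pyGetD arr i 0)

def stepA (arr : List Int) (i : Int) (fl : List (List Int)) (j : Int) : List (List Int) :=
  if checkSolution (tempL arr i j) = 1 ∧ tempL arr i j ∉ fl then fl ++ [tempL arr i j] else fl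

def badL (arr : List Int) : List Int :=
  (PySem.List.pyRange 0 ((arr.length : Int) - 1) 1).filter
    (fun k => !altOk (PySem.List.pyGetD arr k 0) (PySem.List.pyGetD arr (k + 1) 0) k)

def affL (arr : List Int) (i j : Int) : List Int :=
  [j - 1, j, i - 1, i].foldl
    (fun acc k => if (0 ≤ k ∧ k < (arr.length : Int) - 1) ∧ k ∉ acc then acc ++ [k] else acc) []

def valF (arr : List Int) (i j k : Int) : Int :=
  if k = i then PySem.List.pyGetD arr j 0
  else if k = j then PySem.List.pyGetD arr i 0
  else PySem.List.pyGetD arr k 0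

def stepB (arr : List Int) (i : Int) (st : List (List Int) × PySem.Set (List Int)) (j : Int) :
    List (List Int) × PySem.Set (List Int) :=
  if ((badL arr).length : Int)
      ≠ (((affL arr i j).filter
          (fun k => PySem.Set.contains (PySem.Set.ofList (badL arr)) k)).length : Int) then st
  else
    if (affL arr i j).all (fun k => altOk (valF arr i j k) (valF arr i j (k + 1)) k) then
      if tempL arr i j ∈ st.2 then st
      else (st.1 ++ [tempL arr i j], PySem.Set.add st.2 (tempL arr i j))
    else st

-- the swap, in Nat-index form
def swapT (arr : List Int) (ii jj : Nat) : List Int :=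
  (arr.set ii (arr.getD jj 0)).set jj (arr.getD ii 0)

theorem tempL_natCast (arr : List Int) (ii jj : Nat) :
    tempL arr (ii : Int) (jj : Int) = swapT arr ii jj := by
  simp [tempL, swapT, PySem.List.pySetD_natCast, PySem.List.pyGetD_natCast]

-- adjacency kk of l is "good" for a zigzag (rise on even kk, fall on odd kk)
def okN (l : List Int) (kk : Nat) : Bool :=
  if kk % 2 = 0 then decide (l.getD kk 0 < l.getD (kk + 1) 0)
  else decide (l.getD kk 0 > l.getD (kk + 1) 0)

theorem altOk_getD (l : List Int) (kk : Nat) :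
    altOk (l.getD kk 0) (l.getD (kk + 1) 0) (kk : Int) = okN l kk := by
  rw [altOk, okN, PySem.Int.mod_eq_emod_of_pos (by norm_num)]
  have h2 : ((kk : Int) % 2 = 0) ↔ (kk % 2 = 0) := by omega
  by_cases h : kk % 2 = 0
  · rw [if_pos (h2.mpr h), if_pos h]
  · rw [if_neg (fun hh => h (h2.mp hh)), if_neg h]

theorem altOk_natCast (l : List Int) (kk : Nat) :
    altOk (PySem.List.pyGetD l (kk : Int) 0) (PySem.List.pyGetD l ((kk : Int) + 1) 0) (kk : Int)
      = okN l kk := by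
  have h1 : ((kk : Int) + 1) = ((kk + 1 : Nat) : Int) := by push_cast; ring
  rw [h1, PySem.List.pyGetD_natCast, PySem.List.pyGetD_natCast, altOk_getD]

-- the branch condition of checkSolution's loop body, as one Bool
def condA (l : List Int) (k : Int) : Bool :=
  decide ((PySem.Int.mod (k + 1) 2 ≠ 0 ∧ PySem.List.pyGetD l k 0 < PySem.List.pyGetD l (k + 1) 0)
    ∨ (PySem.Int.mod (k + 1) 2 = 0 ∧ PySem.List.pyGetD l k 0 > PySem.List.pyGetD l (k + 1) 0))

theorem condA_natCast (l : List Int) (kk : Nat) : condA l (kk : Int) = okN l kk := by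
  have h1 : ((kk : Int) + 1) = ((kk + 1 : Nat) : Int) := by push_cast; ring
  rw [condA, h1, PySem.List.pyGetD_natCast, PySem.List.pyGetD_natCast,
    PySem.Int.mod_eq_emod_of_pos (by norm_num), okN]
  by_cases h : kk % 2 = 0
  · have hd1 : ((kk : Int) + 1) % 2 = 1 := by omega
    have hd2 : ¬ (2 ∣ ((kk : Int) + 1)) := by omega
    simp [h, hd1, hd2, List.getD_eq_getElem?_getD]
  · have hd1 : ((kk : Int) + 1) % 2 ≠ 1 := by omega
    have hd2 : (2 ∣ ((kk : Int) + 1)) := by omega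
    simp [h, hd1, hd2, List.getD_eq_getElem?_getD]

theorem checkGo_eq (l : List Int) :
    ∀ (ks : List Int) (a : Int),
      checkGo l ks a = if ks.all (condA l) then (if ks.isEmpty then a else 1) else 0 := by
  intro ks
  induction ks with
  | nil => intro a; simp [checkGo]
  | cons k rest ih =>
    intro a
    rw [checkGo]
    have hstep : condA l k = true →
        checkGo l rest 1
          = if (k :: rest).all (condA l) then (if (k :: rest).isEmpty then a else 1) else 0 := by
      intro hc
      rw [ih 1]
      by_cases hr : rest.all (condA l) <;> simp [hc, hr]
    by_cases h1 : PySem.Int.mod (k + 1) 2 ≠ 0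
        ∧ PySem.List.pyGetD l k 0 < PySem.List.pyGetD l (k + 1) 0
    · rw [if_pos h1]
      exact hstep (by simp only [condA, decide_eq_true_eq]; exact Or.inl h1)
    · rw [if_neg h1]
      by_cases hsnd : PySem.Int.mod (k + 1) 2 = 0
          ∧ PySem.List.pyGetD l k 0 > PySem.List.pyGetD l (k + 1) 0
      · rw [if_pos hsnd]
        exact hstep (by simp only [condA, decide_eq_true_eq]; exact Or.inr hsnd)
      · rw [if_neg hsnd]
        have hc : condA l k = false := by
          simp only [condA, decide_eq_false_iff_not]
          exact not_or.mpr ⟨h1, hsnd⟩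
        simp [hc]

theorem checkSolution_eq_one_iff (l : List Int) (h2 : 2 ≤ l.length) :
    checkSolution l = 1 ↔ ∀ kk < l.length - 1, okN l kk = true := by
  have hlen : ((l.length : Int) - 1) = ((l.length - 1 : Nat) : Int) := by omega
  rw [checkSolution, hlen, PySem.List.pyRange_zero_natCast, checkGo_eq, List.all_map]
  have hne : (List.map (fun k : Nat => (k : Int)) (List.range (l.length - 1))).isEmpty = false := by
    cases hE : (List.map (fun k : Nat => (k : Int)) (List.range (l.length - 1))).isEmpty with
    | false => rfl
    | true =>
      exfalso
      have := List.isEmpty_iff.mp hE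
      rw [List.map_eq_nil_iff, List.range_eq_nil] at this
      omega
  rw [hne]
  have hb : ((List.range (l.length - 1)).all ((condA l) ∘ (fun k => (k : Int))) = true)
      ↔ ∀ kk < l.length - 1, okN l kk = true := by
    simp only [List.all_eq_true, List.mem_range, Function.comp_apply]
    constructor
    · intro h kk hk; rw [← condA_natCast]; exact h kk hk
    · intro h kk hk; rw [condA_natCast]; exact h kk hk
  by_cases hall : ∀ kk < l.length - 1, okN l kk = true
  · rw [if_pos (hb.mpr hall)]
    simpa using hall
  · rw [if_neg (fun hh => hall (hb.mp hh))]
    constructor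
    · intro h; norm_num at h
    · intro h; exact absurd h hall

theorem swapT_getD (arr : List Int) (ii jj k : Nat) (hne : ii ≠ jj)
    (hii : ii < arr.length) (hjj : jj < arr.length) :
    (swapT arr ii jj).getD k 0
      = if k = jj then arr.getD ii 0 else if k = ii then arr.getD jj 0 else arr.getD k 0 := by
  unfold swapT
  rw [List.getD_eq_getElem?_getD, List.getElem?_set, List.getElem?_set]
  simp only [List.length_set]
  by_cases h1 : jj = k
  · rw [if_pos h1, if_pos hjj, if_pos h1.symm]
    simp
  · rw [if_neg h1, if_neg (fun hh : k = jj => h1 hh.symm)]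
    by_cases hch2 : ii = k
    · rw [if_pos hch2, if_pos hii, if_pos hch2.symm]
      simp
    · rw [if_neg hch2, if_neg (fun hh : k = ii => hch2 hh.symm)]
      simp [List.getD_eq_getElem?_getD]

theorem valF_natCast (arr : List Int) (ii jj kk : Nat) (hne : ii ≠ jj)
    (hii : ii < arr.length) (hjj : jj < arr.length) :
    valF arr (ii : Int) (jj : Int) (kk : Int) = (swapT arr ii jj).getD kk 0 := by
  rw [valF, swapT_getD arr ii jj kk hne hii hjj]
  by_cases h1 : kk = ii
  · rw [if_pos (by exact_mod_cast h1), if_neg (by omega), if_pos h1,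
      PySem.List.pyGetD_natCast]
  · rw [if_neg (by exact_mod_cast h1)]
    by_cases h2 : kk = jj
    · rw [if_pos (by exact_mod_cast h2), if_pos h2, PySem.List.pyGetD_natCast]
    · rw [if_neg (by exact_mod_cast h2), if_neg h2, if_neg h1, PySem.List.pyGetD_natCast]

theorem okN_swap_val (arr : List Int) (ii jj kk : Nat) (hji : jj < ii) (hin : ii < arr.length)
    (hkk : kk < arr.length - 1) :
    altOk (valF arr (ii : Int) (jj : Int) (kk : Int))
        (valF arr (ii : Int) (jj : Int) ((kk : Int) + 1)) (kk : Int)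
      = okN (swapT arr ii jj) kk := by
  have hne : ii ≠ jj := by omega
  have hjlen : jj < arr.length := by omega
  have hc : ((kk : Int) + 1) = ((kk + 1 : Nat) : Int) := by push_cast; ring
  rw [valF_natCast arr ii jj kk hne hin hjlen, hc,
    valF_natCast arr ii jj (kk + 1) hne hin hjlen, altOk_getD]

-- membership and nodup of the conditional-append dedup fold
theorem dedupFold_spec (P : Int → Prop) [DecidablePred P] :
    ∀ (l acc : List Int), acc.Nodup →
      ((l.foldl (fun acc k => if P k ∧ k ∉ acc then acc ++ [k] else acc) acc).Nodup
        ∧ ∀ x, (x ∈ l.foldl (fun acc k => if P k ∧ k ∉ acc then acc ++ [k] else acc) acc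
            ↔ x ∈ acc ∨ (x ∈ l ∧ P x))) := by
  intro l
  induction l with
  | nil => intro acc h; simpa using h
  | cons k t ih =>
    intro acc hacc
    simp only [List.foldl_cons]
    by_cases hk : P k ∧ k ∉ acc
    · rw [if_pos hk]
      obtain ⟨hnod, hmem⟩ := ih (acc ++ [k])
        (by simp [List.nodup_append, hacc]; exact fun a ha hak => hk.2 (hak ▸ ha))
      refine ⟨hnod, fun x => ?_⟩
      rw [hmem x, List.mem_append, List.mem_singleton]
      have hPk := hk.1
      constructor
      · rintro ((h | rfl) | ⟨hx, hP⟩)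
        · exact Or.inl h
        · exact Or.inr ⟨List.mem_cons_self, hPk⟩
        · exact Or.inr ⟨List.mem_cons_of_mem _ hx, hP⟩
      · rintro (h | ⟨hx, hP⟩)
        · exact Or.inl (Or.inl h)
        · rcases List.mem_cons.mp hx with rfl | hx'
          · exact Or.inl (Or.inr rfl)
          · exact Or.inr ⟨hx', hP⟩
    · rw [if_neg hk]
      obtain ⟨hnod, hmem⟩ := ih acc hacc
      refine ⟨hnod, fun x => ?_⟩
      rw [hmem x]
      rcases not_and_or.mp hk with hP | hin
      · constructor
        · rintro (h | ⟨hx, hPx⟩)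
          · exact Or.inl h
          · exact Or.inr ⟨List.mem_cons_of_mem _ hx, hPx⟩
        · rintro (h | ⟨hx, hPx⟩)
          · exact Or.inl h
          · rcases List.mem_cons.mp hx with rfl | hx'
            · exact absurd hPx hP
            · exact Or.inr ⟨hx', hPx⟩
      · rw [not_not] at hin
        constructor
        · rintro (h | ⟨hx, hPx⟩)
          · exact Or.inl h
          · exact Or.inr ⟨List.mem_cons_of_mem _ hx, hPx⟩
        · rintro (h | ⟨hx, hPx⟩)
          · exact Or.inl h
          · rcases List.mem_cons.mp hx with rfl | hx'
            · exact Or.inl hin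
            · exact Or.inr ⟨hx', hPx⟩

theorem aff_spec (arr : List Int) (i j : Int) :
    (affL arr i j).Nodup
      ∧ ∀ x, x ∈ affL arr i j
          ↔ x ∈ ([j - 1, j, i - 1, i] : List Int) ∧ (0 ≤ x ∧ x < (arr.length : Int) - 1) := by
  have := dedupFold_spec (fun k => 0 ≤ k ∧ k < (arr.length : Int) - 1)
    [j - 1, j, i - 1, i] [] List.nodup_nil
  simpa [affL] using this

theorem untouched_okN (arr : List Int) (ii jj kk : Nat) (hji : jj < ii) (hin : ii < arr.length)
    (hkk : kk < arr.length - 1)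
    (hm : (kk : Int) ∉ affL arr (ii : Int) (jj : Int)) :
    okN (swapT arr ii jj) kk = okN arr kk := by
  have hne : ii ≠ jj := by omega
  have hjlen : jj < arr.length := by omega
  obtain ⟨_, haffmem⟩ := aff_spec arr (ii : Int) (jj : Int)
  have hq : (kk : Int) ∉ ([(jj : Int) - 1, (jj : Int), (ii : Int) - 1, (ii : Int)] : List Int) := by
    intro hq
    exact hm ((haffmem _).mpr ⟨hq, by push_cast; omega, by push_cast; omega⟩)
  simp only [List.mem_cons, List.not_mem_nil, or_false, not_or] at hq
  obtain ⟨q1, q2, q3, q4⟩ := hq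
  have h1 : kk ≠ jj := fun h => q2 (by exact_mod_cast h)
  have h2 : kk ≠ ii := fun h => q4 (by exact_mod_cast h)
  have h3 : kk + 1 ≠ jj := fun h => q1 (by push_cast; omega)
  have h4 : kk + 1 ≠ ii := fun h => q3 (by push_cast; omega)
  have e1 : (swapT arr ii jj).getD kk 0 = arr.getD kk 0 := by
    rw [swapT_getD arr ii jj kk hne hin hjlen, if_neg h1, if_neg h2]
  have e2 : (swapT arr ii jj).getD (kk + 1) 0 = arr.getD (kk + 1) 0 := by
    rw [swapT_getD arr ii jj (kk + 1) hne hin hjlen, if_neg h3, if_neg h4]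
  rw [okN, okN, e1, e2]

theorem count_split (p : Int → Bool) (R aff : List Int) (hR : R.Nodup) (haff : aff.Nodup)
    (hsub : ∀ x ∈ aff, x ∈ R) :
    R.countP p = aff.countP p + (R.filter (fun x => !decide (x ∈ aff))).countP p := by
  have hperm : (R.filter (fun x => decide (x ∈ aff))
      ++ R.filter (fun x => !decide (x ∈ aff))).Perm R :=
    List.filter_append_perm _ R
  have h1 : R.countP p = (R.filter (fun x => decide (x ∈ aff))).countP p
      + (R.filter (fun x => !decide (x ∈ aff))).countP p := by
    rw [← List.countP_append]
    exact (hperm.countP_eq p).symm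
  have hperm2 : (R.filter (fun x => decide (x ∈ aff))).Perm aff := by
    rw [List.perm_ext_iff_of_nodup (List.Nodup.filter _ hR) haff]
    intro a
    simp only [List.mem_filter, decide_eq_true_eq]
    exact ⟨fun h => h.2, fun h => ⟨hsub a h, h⟩⟩
  rw [h1, hperm2.countP_eq]

theorem count_iff (arr : List Int) (ii jj : Nat) (hji : jj < ii) (hin : ii < arr.length) :
    (((badL arr).length : Int)
        = (((affL arr (ii : Int) (jj : Int)).filter
            (fun k => PySem.Set.contains (PySem.Set.ofList (badL arr)) k)).length : Int))
      ↔ ∀ kk < arr.length - 1,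
          (kk : Int) ∉ affL arr (ii : Int) (jj : Int) → okN arr kk = true := by
  obtain ⟨haffnd, haffmem⟩ := aff_spec arr (ii : Int) (jj : Int)
  have hR1 : ((arr.length : Int) - 1) = ((arr.length - 1 : Nat) : Int) := by omega
  have hmemR : ∀ x, x ∈ PySem.List.pyRange 0 ((arr.length : Int) - 1) 1
      ↔ 0 ≤ x ∧ x < (arr.length : Int) - 1 := by
    intro x; exact PySem.List.mem_pyRange_one
  have hRnd : (PySem.List.pyRange 0 ((arr.length : Int) - 1) 1).Nodup := by
    rw [hR1, PySem.List.pyRange_zero_natCast]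
    exact (List.nodup_range).map (fun a b h => by exact_mod_cast h)
  have hsub : ∀ x ∈ affL arr (ii : Int) (jj : Int),
      x ∈ PySem.List.pyRange 0 ((arr.length : Int) - 1) 1 := by
    intro x hx
    obtain ⟨_, hb⟩ := (haffmem x).mp hx
    exact (hmemR x).mpr hb
  have hcnt1 : ((affL arr (ii : Int) (jj : Int)).filter
        (fun k => PySem.Set.contains (PySem.Set.ofList (badL arr)) k)).length
      = (affL arr (ii : Int) (jj : Int)).countP
          (fun k => !altOk (PySem.List.pyGetD arr k 0) (PySem.List.pyGetD arr (k + 1) 0) k) := by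
    rw [← List.countP_eq_length_filter]
    apply List.countP_congr
    intro x hx
    have hxR := hsub x hx
    simp only [PySem.Set.contains_eq_decide, decide_eq_true_eq, PySem.Set.mem_ofList, badL,
      List.mem_filter]
    constructor
    · rintro ⟨_, h⟩; exact h
    · intro h; exact ⟨hxR, h⟩
  have hsplit : (badL arr).length
      = (affL arr (ii : Int) (jj : Int)).countP
          (fun k => !altOk (PySem.List.pyGetD arr k 0) (PySem.List.pyGetD arr (k + 1) 0) k)
        + ((PySem.List.pyRange 0 ((arr.length : Int) - 1) 1).filter
            (fun x => !decide (x ∈ affL arr (ii : Int) (jj : Int)))).countP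
          (fun k => !altOk (PySem.List.pyGetD arr k 0) (PySem.List.pyGetD arr (k + 1) 0) k) := by
    rw [badL, ← List.countP_eq_length_filter]
    exact count_split _ _ _ hRnd haffnd hsub
  rw [hcnt1, Nat.cast_inj]
  constructor
  · intro h kk hkk hnm
    have hz : ((PySem.List.pyRange 0 ((arr.length : Int) - 1) 1).filter
        (fun x => !decide (x ∈ affL arr (ii : Int) (jj : Int)))).countP
          (fun k => !altOk (PySem.List.pyGetD arr k 0) (PySem.List.pyGetD arr (k + 1) 0) k)
        = 0 := by omega
    rw [List.countP_eq_zero] at hz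
    have hkmem : (kk : Int) ∈ (PySem.List.pyRange 0 ((arr.length : Int) - 1) 1).filter
        (fun x => !decide (x ∈ affL arr (ii : Int) (jj : Int))) := by
      rw [List.mem_filter]
      exact ⟨(hmemR _).mpr ⟨by positivity, by push_cast; omega⟩, by simp [hnm]⟩
    have := hz _ hkmem
    rw [altOk_natCast] at this
    simp only [Bool.not_eq_true', Bool.not_eq_false] at this
    simpa using this
  · intro h
    have hz : ((PySem.List.pyRange 0 ((arr.length : Int) - 1) 1).filter
        (fun x => !decide (x ∈ affL arr (ii : Int) (jj : Int)))).countP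
          (fun k => !altOk (PySem.List.pyGetD arr k 0) (PySem.List.pyGetD arr (k + 1) 0) k)
        = 0 := by
      rw [List.countP_eq_zero]
      intro x hx
      rw [List.mem_filter] at hx
      obtain ⟨hxR, hxn⟩ := hx
      obtain ⟨h0, hlt⟩ := (hmemR x).mp hxR
      obtain ⟨kk, rfl⟩ := Int.eq_ofNat_of_zero_le h0
      have hkk : kk < arr.length - 1 := by omega
      have hnm : (kk : Int) ∉ affL arr (ii : Int) (jj : Int) := by
        simpa using hxn
      have := h kk hkk hnm
      rw [altOk_natCast]
      simp [this]
    omega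

theorem gate_iff (arr : List Int) (ii jj : Nat) (hji : jj < ii) (hin : ii < arr.length) :
    ((((badL arr).length : Int)
        = (((affL arr (ii : Int) (jj : Int)).filter
            (fun k => PySem.Set.contains (PySem.Set.ofList (badL arr)) k)).length : Int))
      ∧ (affL arr (ii : Int) (jj : Int)).all
          (fun k => altOk (valF arr (ii : Int) (jj : Int) k)
            (valF arr (ii : Int) (jj : Int) (k + 1)) k) = true)
    ↔ checkSolution (tempL arr (ii : Int) (jj : Int)) = 1 := by
  have hlen2 : 2 ≤ arr.length := by omega
  have hlsw : (swapT arr ii jj).length = arr.length := by simp [swapT]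
  rw [tempL_natCast, checkSolution_eq_one_iff _ (by rw [hlsw]; omega), hlsw]
  obtain ⟨haffnd, haffmem⟩ := aff_spec arr (ii : Int) (jj : Int)
  have hall : ((affL arr (ii : Int) (jj : Int)).all
        (fun k => altOk (valF arr (ii : Int) (jj : Int) k)
          (valF arr (ii : Int) (jj : Int) (k + 1)) k) = true)
      ↔ ∀ kk < arr.length - 1, (kk : Int) ∈ affL arr (ii : Int) (jj : Int)
          → okN (swapT arr ii jj) kk = true := by
    rw [List.all_eq_true]
    constructor
    · intro h kk hk hmem
      have := h _ hmem
      rwa [okN_swap_val arr ii jj kk hji hin hk] at this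
    · intro h k hk
      obtain ⟨_, h0, hlt⟩ := (haffmem k).mp hk
      obtain ⟨kk, rfl⟩ := Int.eq_ofNat_of_zero_le h0
      have hkk : kk < arr.length - 1 := by omega
      rw [okN_swap_val arr ii jj kk hji hin hkk]
      exact h kk hkk hk
  rw [hall, count_iff arr ii jj hji hin]
  constructor
  · rintro ⟨hc, ha⟩ kk hk
    by_cases hm : (kk : Int) ∈ affL arr (ii : Int) (jj : Int)
    · exact ha kk hk hm
    · rw [untouched_okN arr ii jj kk hji hin hk hm]
      exact hc kk hk hm
  · intro h
    constructor
    · intro kk hk hm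
      rw [← untouched_okN arr ii jj kk hji hin hk hm]
      exact h kk hk
    · intro kk hk _
      exact h kk hk

theorem step_eq (arr : List Int) (ii jj : Nat) (hji : jj < ii) (hin : ii < arr.length)
    (fl : List (List Int)) (s : PySem.Set (List Int)) (hinv : ∀ t, t ∈ s ↔ t ∈ fl) :
    stepA arr (ii : Int) fl (jj : Int) = (stepB arr (ii : Int) (fl, s) (jj : Int)).1
    ∧ ∀ t, t ∈ (stepB arr (ii : Int) (fl, s) (jj : Int)).2
        ↔ t ∈ (stepB arr (ii : Int) (fl, s) (jj : Int)).1 := by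
  have hg := gate_iff arr ii jj hji hin
  simp only [stepA, stepB]
  by_cases h1 : ((badL arr).length : Int)
      = (((affL arr (ii : Int) (jj : Int)).filter
          (fun k => PySem.Set.contains (PySem.Set.ofList (badL arr)) k)).length : Int)
  · rw [if_neg (not_not.mpr h1)]
    by_cases h2 : (affL arr (ii : Int) (jj : Int)).all
        (fun k => altOk (valF arr (ii : Int) (jj : Int) k)
          (valF arr (ii : Int) (jj : Int) (k + 1)) k) = true
    · rw [if_pos h2]
      have hchk : checkSolution (tempL arr (ii : Int) (jj : Int)) = 1 := hg.mp ⟨h1, h2⟩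
      by_cases h3 : tempL arr (ii : Int) (jj : Int) ∈ s
      · rw [if_pos h3, if_neg (fun hc => hc.2 ((hinv _).mp h3))]
        exact ⟨rfl, hinv⟩
      · rw [if_neg h3, if_pos ⟨hchk, fun hf => h3 ((hinv _).mpr hf)⟩]
        refine ⟨rfl, fun t => ?_⟩
        rw [PySem.Set.mem_add, List.mem_append, List.mem_singleton, hinv t]
    · rw [if_neg h2]
      have hchk : ¬ checkSolution (tempL arr (ii : Int) (jj : Int)) = 1 :=
        fun hc => h2 (hg.mpr hc).2
      rw [if_neg (fun hc => hchk hc.1)]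
      exact ⟨rfl, hinv⟩
  · rw [if_pos h1]
    have hchk : ¬ checkSolution (tempL arr (ii : Int) (jj : Int)) = 1 :=
      fun hc => h1 (hg.mpr hc).1
    rw [if_neg (fun hc => hchk hc.1)]
    exact ⟨rfl, hinv⟩

theorem inner_loop (arr : List Int) (ii : Nat) (hin : ii < arr.length) :
    ∀ (jjs : List Nat), (∀ jj ∈ jjs, jj < ii) →
      ∀ (fl : List (List Int)) (s : PySem.Set (List Int)), (∀ t, t ∈ s ↔ t ∈ fl) →
      jjs.foldl (fun fl (jj : Nat) => stepA arr (ii : Int) fl (jj : Int)) fl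
          = (jjs.foldl (fun st (jj : Nat) => stepB arr (ii : Int) st (jj : Int)) (fl, s)).1
        ∧ ∀ t, t ∈ (jjs.foldl (fun st (jj : Nat) => stepB arr (ii : Int) st (jj : Int)) (fl, s)).2
            ↔ t ∈ (jjs.foldl (fun st (jj : Nat) => stepB arr (ii : Int) st (jj : Int)) (fl, s)).1 := by
  intro jjs
  induction jjs with
  | nil => intro _ fl s hinv; exact ⟨rfl, hinv⟩
  | cons jj rest ih =>
    intro hb fl s hinv
    obtain ⟨heq, hinv'⟩ := step_eq arr ii jj (hb jj List.mem_cons_self) hin fl s hinv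
    simp only [List.foldl_cons]
    have hrec := ih (fun j hj => hb j (List.mem_cons_of_mem _ hj))
      (stepB arr (ii : Int) (fl, s) (jj : Int)).1
      (stepB arr (ii : Int) (fl, s) (jj : Int)).2 hinv'
    rw [heq]
    simpa using hrec

theorem outer_loop (arr : List Int) :
    ∀ (iis : List Nat), (∀ i ∈ iis, i < arr.length) →
      ∀ (fl : List (List Int)) (s : PySem.Set (List Int)), (∀ t, t ∈ s ↔ t ∈ fl) →
      iis.foldl (fun fl ii =>
          (List.range ii).foldl (fun fl (jj : Nat) => stepA arr (ii : Int) fl (jj : Int)) fl) fl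
          = (iis.foldl (fun st ii =>
              (List.range ii).foldl (fun st (jj : Nat) => stepB arr (ii : Int) st (jj : Int)) st)
              (fl, s)).1
        ∧ ∀ t, t ∈ (iis.foldl (fun st ii =>
              (List.range ii).foldl (fun st (jj : Nat) => stepB arr (ii : Int) st (jj : Int)) st)
              (fl, s)).2
            ↔ t ∈ (iis.foldl (fun st ii =>
              (List.range ii).foldl (fun st (jj : Nat) => stepB arr (ii : Int) st (jj : Int)) st)
              (fl, s)).1 := by
  intro iis
  induction iis with
  | nil => intro _ fl s hinv; exact ⟨rfl, hinv⟩
  | cons ii rest ih =>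
    intro hb fl s hinv
    obtain ⟨heq, hinv'⟩ := inner_loop arr ii (hb ii List.mem_cons_self) (List.range ii)
      (fun j hj => List.mem_range.mp hj) fl s hinv
    simp only [List.foldl_cons]
    have hrec := ih (fun i hi => hb i (List.mem_cons_of_mem _ hi))
      ((List.range ii).foldl (fun st (jj : Nat) => stepB arr (ii : Int) st (jj : Int)) (fl, s)).1
      ((List.range ii).foldl (fun st (jj : Nat) => stepB arr (ii : Int) st (jj : Int)) (fl, s)).2 hinv'
    rw [heq]
    simpa using hrec

theorem range_filter_lt (ii n : Nat) (h : ii ≤ n) :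
    (List.range n).filter
        (fun jj : Nat => decide ((ii : Int) ≠ (jj : Int) ∧ (ii : Int) > (jj : Int)))
      = List.range ii := by
  have hn : n = ii + (n - ii) := by omega
  rw [hn, List.range_add, List.filter_append]
  have h1 : (List.range ii).filter
      (fun jj : Nat => decide ((ii : Int) ≠ (jj : Int) ∧ (ii : Int) > (jj : Int)))
      = List.range ii := by
    apply List.filter_eq_self.mpr
    intro a ha
    have := List.mem_range.mp ha
    simp only [decide_eq_true_eq]
    push_cast
    omega
  have h2 : ((List.range (n - ii)).map (fun x => ii + x)).filter
      (fun jj : Nat => decide ((ii : Int) ≠ (jj : Int) ∧ (ii : Int) > (jj : Int))) = [] := by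
    apply List.filter_eq_nil_iff.mpr
    intro a ha
    simp only [List.mem_map] at ha
    obtain ⟨x, _, rfl⟩ := ha
    simp only [decide_eq_true_eq]
    push_cast
    omega
  rw [h1, h2, List.append_nil]

theorem solveA_eq (arr : List Int)
    (hhead : ¬(arr.length = 2 ∧ PySem.List.pyGetD arr 0 0 ≠ PySem.List.pyGetD arr 1 0)) :
    solve arr = (List.range arr.length).foldl
      (fun fl ii => (List.range ii).foldl (fun fl (jj : Nat) => stepA arr (ii : Int) fl (jj : Int)) fl)
      [] := by
  rw [solve, if_neg hhead, PySem.List.pyRange_zero_natCast, List.foldl_map]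
  apply PySem.List.foldl_congr_mem
  intro fl ii hmem
  have hii : ii ≤ arr.length := le_of_lt (List.mem_range.mp hmem)
  rw [PySem.List.foldl_ite_eq_foldl_filter (fun j => (ii : Int) ≠ j ∧ (ii : Int) > j)]
  rw [List.filter_map]
  simp only [Function.comp_def]
  rw [range_filter_lt ii arr.length hii, List.foldl_map]
  rfl

theorem solveB_eq (arr : List Int)
    (hhead : ¬(arr.length = 2 ∧ PySem.List.pyGetD arr 0 0 ≠ PySem.List.pyGetD arr 1 0)) :
    solve_alt arr = ((List.range arr.length).foldl
      (fun st ii => (List.range ii).foldl (fun st (jj : Nat) => stepB arr (ii : Int) st (jj : Int)) st)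
      (([] : List (List Int)), (PySem.Set.empty : PySem.Set (List Int)))).1 := by
  simp only [solve_alt]
  rw [if_neg hhead, PySem.List.pyRange_zero_natCast, List.foldl_map]
  refine congrArg Prod.fst ?_
  apply PySem.List.foldl_congr_mem
  intro st ii hmem
  rw [PySem.List.pyRange_zero_natCast, List.foldl_map]
  rfl

-- ===== VERDICT (by name: the statement is the Claim_ definition above) =====
theorem solve_spec : Claim_equal_solve := by
  intro arr _
  unfold Spec_solve
  by_cases hhead : arr.length = 2 ∧ PySem.List.pyGetD arr 0 0 ≠ PySem.List.pyGetD arr 1 0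
  · show solve arr = solve_alt arr
    rw [solve, solve_alt, if_pos hhead, if_pos hhead]
  · rw [solveA_eq arr hhead, solveB_eq arr hhead]
    exact (outer_loop arr (List.range arr.length) (fun i hi => List.mem_range.mp hi)
      [] PySem.Set.empty (by simp [PySem.Set.empty])).1
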